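-- pv_equiv track=rewrite | github.com/pypi-data/pypi-mirror-378 | packages/ctfutils/ctfutils-0.1.0.tar.gz/ctfutils-0.1.0/ctfutils/misc/utils.py | bruteforce_pattern
-- ===== SOURCE A (Python) =====
-- import itertools
-- import string
-- from typing import List, Generator, Union
--
-- def bruteforce_pattern(pattern: str, charset: str = string.ascii_lowercase) -> Generator[str, None, None]:
--     """
--     Generate strings matching a pattern.
--     Use '?' for variable characters.
--
--     Args:
--         pattern: Pattern with '?' for variable chars
--         charset: Characters to substitute
--
--     Yields:
--         Generated strings
--
--     Example:
--         >>> list(WordlistGenerator.bruteforce_pattern("a?c", "xyz"))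
--         ['axc', 'ayc', 'azc']
--     """
--     variable_positions = [i for i, char in enumerate(pattern) if char == '?']
--
--     if not variable_positions:
--         yield pattern
--         return
--
--     for combination in itertools.product(charset, repeat=len(variable_positions)):
--         result = list(pattern)
--         for pos, char in zip(variable_positions, combination):
--             result[pos] = char
--         yield ''.join(result)
-- ===== SOURCE B (Python) =====
-- import string
--
-- def bruteforce_pattern(pattern, charset=string.ascii_lowercase):
--     # One left-to-right pass growing a list of results: literal chars are
--     # buffered in a run; each '?' flushes the run onto every result and
--     # branches it over charset (later '?'s vary fastest, as with product).
--     results = ['']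
--     run = []
--     for c in pattern:
--         if c == '?':
--             seg = ''.join(run)
--             run = []
--             results = [r + seg + x for r in results for x in charset]
--         else:
--             run.append(c)
--     tail = ''.join(run)
--     yield from (r + tail for r in results)
-- ===== Notes on version B (the rewrite author's own statement) =====
-- stated objective: faster
-- what changed: Replaced the itertools.product enumeration over '?'-positions plus per-combination list(pattern) copy and join by a single left-to-right pass that buffers literal runs and branches the result list over charset at each '?'.
import Mathlib
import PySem

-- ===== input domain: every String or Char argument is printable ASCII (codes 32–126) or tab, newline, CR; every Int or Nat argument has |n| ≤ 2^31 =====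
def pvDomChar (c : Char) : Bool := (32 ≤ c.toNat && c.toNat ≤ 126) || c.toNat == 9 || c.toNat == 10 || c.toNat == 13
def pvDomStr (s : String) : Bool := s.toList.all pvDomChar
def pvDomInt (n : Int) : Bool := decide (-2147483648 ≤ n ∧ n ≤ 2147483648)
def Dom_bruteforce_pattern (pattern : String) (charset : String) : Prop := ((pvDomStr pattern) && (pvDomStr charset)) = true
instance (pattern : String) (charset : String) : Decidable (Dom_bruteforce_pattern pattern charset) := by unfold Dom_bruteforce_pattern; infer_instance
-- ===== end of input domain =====

-- B replaces the itertools.product enumeration + per-combination positional substitution by a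
-- single pass that buffers literal runs and branches the result list over charset at each '?'
-- (objective: faster, constant-factor). Both are total; equal everywhere.

-- ===== PORT A =====
-- itertools.product(charset, repeat=n), in product's order (rightmost position varies fastest)
def pvProdRep (cs : List Char) : Nat → List (List Char)
  | 0 => [[]]
  | n + 1 => cs.flatMap (fun c => (pvProdRep cs n).map (fun t => c :: t))

def bruteforce_pattern (pattern : String) (charset : String) : List String :=
  let variable_positions : List Int :=
    (PySem.List.enumerate pattern.toList 0).filterMap
      (fun ic => if ic.2 = '?' then some ic.1 else none)
  if variable_positions = [] then [pattern]
  else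
    (pvProdRep charset.toList variable_positions.length).map (fun combination =>
      -- result = list(pattern); result[pos] = char for each (pos,char); indices from
      -- enumerate are ≥ 0 and in range, so .toNat is exact here
      String.ofList (((variable_positions.zip combination).foldl
        (fun r pc => r.set pc.1.toNat pc.2) pattern.toList)))

-- ===== PORT B =====
-- the loop body of B; results/run kept as char lists (a Python str is its list of chars)
def pvStep (cs : List Char) (st : List (List Char) × List Char) (c : Char) :
    List (List Char) × List Char :=
  if c = '?' then (st.1.flatMap (fun r => cs.map (fun x => r ++ st.2 ++ [x])), [])
  else (st.1, st.2 ++ [c])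

def bruteforce_pattern_alt (pattern : String) (charset : String) : List String :=
  let st := pattern.toList.foldl (pvStep charset.toList) ([[]], [])
  st.1.map (fun r => String.ofList (r ++ st.2))

-- ===== PRECONDITION & SPEC =====
def Spec_bruteforce_pattern (pattern : String) (charset : String) (out : List String) : Prop := out = bruteforce_pattern_alt pattern charset
instance (pattern : String) (charset : String) (out : List String) : Decidable (Spec_bruteforce_pattern pattern charset out) := by unfold Spec_bruteforce_pattern; infer_instance

-- ===== CLAIM (what is proved, stated in full; the proofs are below) =====
def Claim_equal_bruteforce_pattern : Prop := ∀ (pattern : String) (charset : String), Dom_bruteforce_pattern pattern charset → Spec_bruteforce_pattern pattern charset (bruteforce_pattern pattern charset)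

-- ===== LEMMAS AND PROOFS =====

-- the '?' positions of l, indices starting at s (proof-side name for A's comprehension)
def pvPos (l : List Char) (s : Int) : List Int :=
  (PySem.List.enumerate l s).filterMap (fun ic => if ic.2 = '?' then some ic.1 else none)

-- prefix-free core of B: all fillings of l as character lists, in B's order
def pvGen (cs : List Char) : List Char → List (List Char)
  | [] => [[]]
  | c :: rest =>
    if c = '?' then cs.flatMap (fun x => (pvGen cs rest).map (fun t => x :: t))
    else (pvGen cs rest).map (fun t => c :: t)

theorem pvPos_nil (s : Int) : pvPos [] s = [] := rfl

theorem pvPos_cons (c : Char) (l : List Char) (s : Int) :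
    pvPos (c :: l) s = (if c = '?' then [s] else []) ++ pvPos l (s + 1) := by
  simp only [pvPos, PySem.List.enumerate_cons, List.filterMap_cons]
  split_ifs <;> simp

theorem pvPos_shift (l : List Char) (s : Int) :
    pvPos l (s + 1) = (pvPos l s).map (· + 1) := by
  induction l generalizing s with
  | nil => simp [pvPos_nil]
  | cons c l ih =>
    rw [pvPos_cons, pvPos_cons, ih (s + 1)]
    split_ifs <;> simp [ih]

theorem pvPos_nonneg (l : List Char) : ∀ p ∈ pvPos l 0, 0 ≤ p := by
  induction l with
  | nil => simp [pvPos_nil]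
  | cons c l ih =>
    rw [pvPos_cons, pvPos_shift]
    intro p hp
    rcases List.mem_append.mp hp with h | h
    · split_ifs at h <;> simp_all
    · obtain ⟨q, hq, rfl⟩ := List.mem_map.mp h
      have := ih q hq; omega

theorem foldl_set_shift (pairs : List (Int × Char)) (c : Char) (r : List Char)
    (h : ∀ p ∈ pairs, 0 ≤ p.1) :
    pairs.foldl (fun r pc => r.set (pc.1 + 1).toNat pc.2) (c :: r)
      = c :: pairs.foldl (fun r pc => r.set pc.1.toNat pc.2) r := by
  induction pairs generalizing r with
  | nil => rfl
  | cons p ps ih =>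
    have hp : 0 ≤ p.1 := h p (List.mem_cons_self ..)
    have h1 : (p.1 + 1).toNat = p.1.toNat + 1 := by omega
    simp only [List.foldl_cons, h1, List.set_cons_succ]
    exact ih _ (fun q hq => h q (List.mem_cons_of_mem _ hq))

-- A's per-combination substitution
def pvSub (l : List Char) (t : List Char) : List Char :=
  ((pvPos l 0).zip t).foldl (fun r pc => r.set pc.1.toNat pc.2) l

theorem pvSub_cons_ne (c : Char) (l : List Char) (t : List Char) (hc : ¬ c = '?') :
    pvSub (c :: l) t = c :: pvSub l t := by
  unfold pvSub
  rw [pvPos_cons, pvPos_shift, if_neg hc]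
  simp only [List.nil_append, List.zip_map_left, List.foldl_map, Prod.map_fst, Prod.map_snd, id]
  exact foldl_set_shift _ _ _ (fun p hp => pvPos_nonneg l p.1 (List.of_mem_zip hp).1)

theorem pvSub_cons_q (l : List Char) (x : Char) (t : List Char) :
    pvSub ('?' :: l) (x :: t) = x :: pvSub l t := by
  unfold pvSub
  rw [pvPos_cons, pvPos_shift, if_pos rfl]
  rw [List.singleton_append, List.zip_cons_cons, List.foldl_cons]
  simp only [List.zip_map_left, List.foldl_map, Prod.map_fst, Prod.map_snd, id]
  rw [show ((0 : Int).toNat) = 0 from rfl, List.set_cons_zero]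
  exact foldl_set_shift _ _ _ (fun p hp => pvPos_nonneg l p.1 (List.of_mem_zip hp).1)

theorem genEq (cs : List Char) (l : List Char) :
    (pvProdRep cs (pvPos l 0).length).map (pvSub l) = pvGen cs l := by
  induction l with
  | nil => simp [pvPos_nil, pvProdRep, pvGen, pvSub]
  | cons c l ih =>
    rw [pvPos_cons, pvPos_shift]
    by_cases hc : c = '?'
    · subst hc
      rw [if_pos rfl]
      simp only [List.singleton_append, List.length_cons, List.length_map]
      show (pvProdRep cs ((pvPos l 0).length + 1)).map (pvSub ('?' :: l)) = pvGen cs ('?' :: l)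
      have h2 : pvGen cs ('?' :: l)
          = cs.flatMap (fun x => (pvGen cs l).map (fun t => x :: t)) := by simp [pvGen]
      rw [pvProdRep, List.map_flatMap, h2]
      refine List.flatMap_congr (fun x _ => ?_)
      rw [List.map_map, ← ih, List.map_map]
      exact List.map_congr_left (fun t _ => by simp [Function.comp, pvSub_cons_q])
    · rw [if_neg hc]
      simp only [List.nil_append, List.length_map]
      have h2 : pvGen cs (c :: l) = (pvGen cs l).map (fun t => c :: t) := by
        simp [pvGen, hc]
      rw [h2, ← ih, List.map_map]
      exact List.map_congr_left (fun t _ => by simp [Function.comp, pvSub_cons_ne c l t hc])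

theorem foldEq (cs : List Char) (l : List Char) (R : List (List Char)) (run : List Char) :
    ((l.foldl (pvStep cs) (R, run)).1).map (fun r => r ++ (l.foldl (pvStep cs) (R, run)).2)
      = R.flatMap (fun r => (pvGen cs l).map (fun t => r ++ run ++ t)) := by
  induction l generalizing R run with
  | nil =>
    simp only [List.foldl_nil, pvGen, List.map_cons, List.map_nil]
    induction R with
    | nil => rfl
    | cons a R ihr => simp_all
  | cons c l ih =>
    by_cases hc : c = '?'
    · subst hc
      rw [List.foldl_cons]
      have hstep : pvStep cs (R, run) '?'
          = (R.flatMap (fun r => cs.map (fun x => r ++ run ++ [x])), []) := by simp [pvStep]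
      rw [hstep, ih]
      have h2 : pvGen cs ('?' :: l)
          = cs.flatMap (fun x => (pvGen cs l).map (fun t => x :: t)) := by simp [pvGen]
      rw [h2]
      simp only [List.flatMap_assoc, List.flatMap_map, List.map_flatMap, List.map_map]
      refine List.flatMap_congr (fun r _ => ?_)
      refine List.flatMap_congr (fun x _ => ?_)
      exact List.map_congr_left (fun t _ => by simp [Function.comp])
    · rw [List.foldl_cons]
      have hstep : pvStep cs (R, run) c = (R, run ++ [c]) := by simp [pvStep, hc]
      rw [hstep, ih]
      have h2 : pvGen cs (c :: l) = (pvGen cs l).map (fun t => c :: t) := by simp [pvGen, hc]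
      rw [h2]
      refine List.flatMap_congr (fun r _ => ?_)
      rw [List.map_map]
      exact List.map_congr_left (fun t _ => by simp [Function.comp])

theorem altEq (pattern charset : String) :
    bruteforce_pattern_alt pattern charset
      = (pvGen charset.toList pattern.toList).map String.ofList := by
  unfold bruteforce_pattern_alt
  have h := foldEq charset.toList pattern.toList [[]] []
  simp only [List.flatMap_cons, List.flatMap_nil, List.append_nil, List.nil_append] at h
  calc (pattern.toList.foldl (pvStep charset.toList) ([[]], [])).1.map
        (fun r => String.ofList (r ++ (pattern.toList.foldl (pvStep charset.toList) ([[]], [])).2))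
      = ((pattern.toList.foldl (pvStep charset.toList) ([[]], [])).1.map
          (fun r => r ++ (pattern.toList.foldl (pvStep charset.toList) ([[]], [])).2)).map
            String.ofList := by rw [List.map_map]; rfl
    _ = (pvGen charset.toList pattern.toList).map String.ofList := by rw [h]; simp

theorem pvMain (pattern charset : String) :
    bruteforce_pattern pattern charset = bruteforce_pattern_alt pattern charset := by
  unfold bruteforce_pattern
  rw [altEq]
  have hpos : (PySem.List.enumerate pattern.toList 0).filterMap
      (fun ic => if ic.2 = '?' then some ic.1 else none) = pvPos pattern.toList 0 := rfl
  simp only [hpos]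
  have key : (pvProdRep charset.toList (pvPos pattern.toList 0).length).map
      (fun combination => String.ofList (pvSub pattern.toList combination))
      = (pvGen charset.toList pattern.toList).map String.ofList := by
    rw [← genEq charset.toList pattern.toList, List.map_map]
    rfl
  split_ifs with h
  · have := key
    rw [h] at this
    simp only [List.length_nil, pvProdRep, List.map_cons, List.map_nil] at this
    have hsub : pvSub pattern.toList [] = pattern.toList := by
      unfold pvSub; rw [h]; rfl
    rw [hsub] at this
    rw [← this]
    rw [String.ofList_toList]
  · exact key

-- ===== VERDICT (by name: the statement is the Claim_ definition above) =====
theorem bruteforce_pattern_spec : Claim_equal_bruteforce_pattern := by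
  intro pattern charset _
  unfold Spec_bruteforce_pattern
  exact pvMain pattern charset
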